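-- pv_equiv track=rewrite | github.com/aevans-eng/portfolio-site | qdd-gearbox/images/generate_catia_tree.py | compute_last_child_flags
-- ===== SOURCE A (Python) =====
-- def compute_last_child_flags(tree):
--     """For each row, determine if it's the last sibling at its indent level."""
--     flags = [False] * len(tree)
--     for i in range(len(tree)):
--         level = tree[i][0]
--         if level == 0:
--             continue
--         # Check if there's any later sibling at the same level under the same parent
--         is_last = True
--         for j in range(i + 1, len(tree)):
--             if tree[j][0] < level:
--                 break  # went up to parent or higher — we were last
--             if tree[j][0] == level:
--                 is_last = False
--                 break
--         flags[i] = is_last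
--     return flags
-- ===== SOURCE B (Python) =====
-- def compute_last_child_flags(tree):
--     """For each row, determine if it's the last sibling at its indent level."""
--     n = len(tree)
--     flags = [False] * n
--     stack = []  # levels of rows after i that are not shadowed; non-increasing from the top
--     for i in range(n - 1, -1, -1):
--         level = tree[i][0]
--         while stack and stack[-1] > level:
--             stack.pop()
--         flags[i] = level != 0 and not (stack and stack[-1] == level)
--         stack.append(level)
--     return flags
-- ===== Notes on version B (the rewrite author's own statement) =====
-- stated objective: alternative
-- what changed: Replaced A's forward scan that re-scans all later rows per row with a single reverse pass maintaining a monotonic stack of levels, so each row is pushed and popped at most once.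
import Mathlib
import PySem

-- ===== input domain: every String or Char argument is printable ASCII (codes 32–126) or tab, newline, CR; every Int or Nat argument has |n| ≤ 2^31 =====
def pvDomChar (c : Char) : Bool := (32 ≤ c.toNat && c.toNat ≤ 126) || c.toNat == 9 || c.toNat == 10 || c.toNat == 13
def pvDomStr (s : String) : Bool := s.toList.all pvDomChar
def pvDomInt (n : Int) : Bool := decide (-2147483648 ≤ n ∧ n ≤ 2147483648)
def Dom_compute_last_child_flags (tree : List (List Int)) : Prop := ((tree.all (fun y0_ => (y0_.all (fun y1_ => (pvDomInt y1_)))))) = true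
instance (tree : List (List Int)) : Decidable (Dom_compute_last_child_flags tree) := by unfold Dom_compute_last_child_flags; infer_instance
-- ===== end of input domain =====

-- B replaces A's per-row forward re-scan by one reverse pass with a monotonic stack of levels (alternative algorithm).

-- ===== PORT A =====
-- tree[j][0]; total via defaults, exact under Pre_ (index always in range, rows nonempty)
def pvRow0 (tree : List (List Int)) (j : Int) : Int :=
  (((PySem.List.pyGet? tree j).getD []).head?).getD 0

-- inner loop 'for j in range(i+1, len(tree)): …' with its two breaks
def aInner (tree : List (List Int)) (level : Int) : List Int → Bool
  | [] => true
  | j :: js =>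
    if pvRow0 tree j < level then true
    else if pvRow0 tree j = level then false
    else aInner tree level js

-- outer loop 'for i in range(len(tree)): …' mutating flags
def aLoop (tree : List (List Int)) : List Int → List Bool → List Bool
  | [], flags => flags
  | i :: is, flags =>
    let level := pvRow0 tree i
    if level = 0 then aLoop tree is flags
    else aLoop tree is
      (flags.set i.toNat (aInner tree level (PySem.List.pyRange (i + 1) (tree.length : Int) 1)))

def compute_last_child_flags (tree : List (List Int)) : List Bool :=
  aLoop tree (PySem.List.pyRange 0 (tree.length : Int) 1) (List.replicate tree.length false)

-- ===== PORT B =====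
-- 'while stack and stack[-1] > level: stack.pop()'  (stack head = top)
def popGT (level : Int) : List Int → List Int
  | [] => []
  | t :: s => if t > level then popGT level s else t :: s

-- body of B's reverse loop: one row, state = (flags built so far, stack)
def bStep (row : List Int) (acc : List Bool × List Int) : List Bool × List Int :=
  let level := (row.head?).getD 0
  let stack := popGT level acc.2
  let flag := (decide (level ≠ 0)) &&
    (match stack with
     | [] => true
     | t :: _ => decide (t ≠ level))
  (flag :: acc.1, level :: stack)

-- 'for i in range(n-1, -1, -1)' = fold over the rows from the right
def compute_last_child_flags_alt (tree : List (List Int)) : List Bool :=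
  (tree.foldr bStep ([], [])).1

-- ===== PRECONDITION & SPEC =====
-- Python A raises IndexError on 'tree[i][0]' when some row is the empty list; Pre_ excludes exactly those trees.
def Pre_compute_last_child_flags (tree : List (List Int)) : Prop := ∀ r ∈ tree, r ≠ []
instance (tree : List (List Int)) : Decidable (Pre_compute_last_child_flags tree) := by
  unfold Pre_compute_last_child_flags; infer_instance

def pvWitness_compute_last_child_flags : List (List Int) := [[0], [1, 7], [1], [2]]

def Spec_compute_last_child_flags (tree : List (List Int)) (out : List Bool) : Prop :=
  out = compute_last_child_flags_alt tree
instance (tree : List (List Int)) (out : List Bool) : Decidable (Spec_compute_last_child_flags tree out) := by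
  unfold Spec_compute_last_child_flags; infer_instance

-- ===== CLAIM (what is proved, stated in full; the proofs are below) =====
def Claim_equal_compute_last_child_flags : Prop :=
  ∀ (tree : List (List Int)), Dom_compute_last_child_flags tree →
    Pre_compute_last_child_flags tree →
    Spec_compute_last_child_flags tree (compute_last_child_flags tree)

-- ===== LEMMAS AND PROOFS =====

-- A's inner scan, seen on the suffix of rows (reference form both ports are reduced to)
def rowScan (level : Int) : List (List Int) → Bool
  | [] => true
  | r :: rs => if (r.head?).getD 0 < level then true
               else if (r.head?).getD 0 = level then false
               else rowScan level rs

-- the flag list, row by row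
def specF : List (List Int) → List Bool
  | [] => []
  | r :: rs => (if (r.head?).getD 0 = 0 then false else rowScan ((r.head?).getD 0) rs) :: specF rs

-- what B's stack answers about the suffix it summarises
def stackCheckLt (l : Int) (s : List Int) : Bool :=
  match popGT l s with
  | [] => true
  | t :: _ => decide (t < l)

theorem take_len_succ {α : Type} (P : List α) (v : α) (R : List α) :
    (P ++ v :: R).take (P.length + 1) = P ++ [v] := by
  simp [List.take_append]

theorem drop_len_succ {α : Type} (P : List α) (v : α) (R : List α) :
    (P ++ v :: R).drop (P.length + 1) = R := by
  simp [List.drop_append]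

theorem popGT_popGT (l m : Int) (h : l ≤ m) (s : List Int) :
    popGT l (popGT m s) = popGT l s := by
  induction s with
  | nil => rfl
  | cons t s ih =>
    by_cases ht : t > m
    · simp [popGT, ht, ih, show t > l by omega]
    · by_cases ht' : t > l
      · simp [popGT, ht, ht']
      · simp [popGT, ht, ht']

theorem popGT_head_le (l : Int) (s : List Int) (t : Int) (ts : List Int)
    (h : popGT l s = t :: ts) : t ≤ l := by
  induction s with
  | nil => simp [popGT] at h
  | cons x s ih =>
    by_cases hx : x > l
    · exact ih (by simpa [popGT, hx] using h)
    · simp [popGT, hx] at h; omega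

-- B's flag match equals the < check, because the stack head after popping is ≤ level
theorem flag_match_eq (l : Int) (s : List Int) :
    (match popGT l s with
     | [] => true
     | t :: _ => decide (t ≠ l)) = stackCheckLt l s := by
  unfold stackCheckLt
  rcases hp : popGT l s with _ | ⟨t, ts⟩
  · rfl
  · have := popGT_head_le l s t ts hp
    by_cases ht : t = l
    · simp [ht]
    · simp [ht, show t < l by omega]

-- B's fold computes specF, and its stack answers rowScan queries on the suffix
theorem bFold (rs : List (List Int)) :
    (rs.foldr bStep ([], [])).1 = specF rs ∧
    ∀ l : Int, rowScan l rs = stackCheckLt l (rs.foldr bStep ([], [])).2 := by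
  induction rs with
  | nil => exact ⟨rfl, fun l => rfl⟩
  | cons r rs ih =>
    obtain ⟨ih1, ih2⟩ := ih
    have hstep : (r :: rs).foldr bStep ([], []) =
        ((decide ((r.head?).getD 0 ≠ 0) &&
          (match popGT ((r.head?).getD 0) (rs.foldr bStep ([], [])).2 with
           | [] => true
           | t :: _ => decide (t ≠ (r.head?).getD 0))) :: (rs.foldr bStep ([], [])).1,
         (r.head?).getD 0 :: popGT ((r.head?).getD 0) (rs.foldr bStep ([], [])).2) := rfl
    constructor
    · rw [hstep]
      show _ :: _ = (if (r.head?).getD 0 = 0 then false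
          else rowScan ((r.head?).getD 0) rs) :: specF rs
      rw [ih1, flag_match_eq, ← ih2 ((r.head?).getD 0)]
      congr 1
      by_cases h0 : (r.head?).getD 0 = 0 <;> simp [h0]
    · intro l
      rw [hstep]
      show rowScan l (r :: rs) =
        stackCheckLt l ((r.head?).getD 0 :: popGT ((r.head?).getD 0) (rs.foldr bStep ([], [])).2)
      by_cases hgt : (r.head?).getD 0 > l
      · have hpop : popGT l ((r.head?).getD 0 :: popGT ((r.head?).getD 0) (rs.foldr bStep ([], [])).2)
            = popGT l (rs.foldr bStep ([], [])).2 := by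
          simp only [popGT, if_pos hgt]
          exact popGT_popGT l ((r.head?).getD 0) (by omega) _
        unfold stackCheckLt
        rw [hpop]
        simp only [rowScan, if_neg (by omega : ¬ (r.head?).getD 0 < l),
          if_neg (by omega : ¬ (r.head?).getD 0 = l)]
        exact ih2 l
      · have hpop : popGT l ((r.head?).getD 0 :: popGT ((r.head?).getD 0) (rs.foldr bStep ([], [])).2)
            = (r.head?).getD 0 :: popGT ((r.head?).getD 0) (rs.foldr bStep ([], [])).2 := by
          simp [popGT, hgt]
        unfold stackCheckLt
        rw [hpop]
        by_cases hlt : (r.head?).getD 0 < l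
        · simp [rowScan, hlt]
        · have heq : (r.head?).getD 0 = l := by omega
          simp [rowScan, heq]

theorem alt_eq_specF (tree : List (List Int)) :
    compute_last_child_flags_alt tree = specF tree :=
  (bFold tree).1

theorem pvRow0_nat (tree : List (List Int)) (j : Nat) (hj : j < tree.length) :
    pvRow0 tree (j : Int) = ((tree[j]).head?).getD 0 := by
  simp [pvRow0, PySem.List.pyGet?_natCast, List.getElem?_eq_getElem hj]

theorem aInner_eq (tree : List (List Int)) (l : Int) (j : Nat) :
    aInner tree l (PySem.List.pyRange (j : Int) (tree.length : Int) 1)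
      = rowScan l (tree.drop j) := by
  by_cases hlt : j < tree.length
  case neg =>
    rw [PySem.List.pyRange_one_eq_nil (by exact_mod_cast Nat.le_of_not_lt hlt)]
    rw [List.drop_eq_nil_of_le (Nat.le_of_not_lt hlt)]
    rfl
  case pos =>
    have hmeas : tree.length - (j + 1) < tree.length - j := by omega
    rw [PySem.List.pyRange_one_cons (by exact_mod_cast hlt)]
    have hdrop : tree.drop j = tree[j] :: tree.drop (j + 1) :=
      (List.getElem_cons_drop hlt).symm
    have hcast : (j : Int) + 1 = ((j + 1 : Nat) : Int) := by push_cast; ring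
    rw [hdrop]
    simp only [aInner, rowScan, pvRow0_nat tree j hlt, hcast, aInner_eq tree l (j + 1)]
termination_by tree.length - j

theorem aLoop_eq (tree : List (List Int)) (j : Nat) (flags : List Bool)
    (hlen : flags.length = tree.length)
    (hrep : flags.drop j = List.replicate (tree.length - j) false) :
    aLoop tree (PySem.List.pyRange (j : Int) (tree.length : Int) 1) flags
      = flags.take j ++ specF (tree.drop j) := by
  by_cases hlt : j < tree.length
  case neg =>
    rw [PySem.List.pyRange_one_eq_nil (by exact_mod_cast Nat.le_of_not_lt hlt)]
    rw [List.drop_eq_nil_of_le (Nat.le_of_not_lt hlt)]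
    rw [List.take_of_length_le (by omega)]
    simp [aLoop, specF]
  case pos =>
    have hmeas : tree.length - (j + 1) < tree.length - j := by omega
    rw [PySem.List.pyRange_one_cons (by exact_mod_cast hlt)]
    have hjf : j < flags.length := by omega
    have hPlen : (flags.take j).length = j := by
      simp [List.length_take, Nat.min_eq_left (Nat.le_of_lt hjf)]
    have hk : tree.length - j = (tree.length - (j + 1)) + 1 := by omega
    -- flags = take j ++ false :: replicate (n-(j+1)) false
    have hflags : flags = flags.take j ++
        false :: List.replicate (tree.length - (j + 1)) false := by
      conv_lhs => rw [← List.take_append_drop j flags]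
      rw [hrep, hk, List.replicate_succ]
    have htakeP : ∀ (v : Bool),
        (flags.take j ++ v :: List.replicate (tree.length - (j + 1)) false).take (j + 1)
          = flags.take j ++ [v] := by
      intro v
      rw [show j + 1 = (flags.take j).length + 1 from by rw [hPlen]]
      exact take_len_succ _ _ _
    have hdropP : ∀ (v : Bool),
        (flags.take j ++ v :: List.replicate (tree.length - (j + 1)) false).drop (j + 1)
          = List.replicate (tree.length - (j + 1)) false := by
      intro v
      rw [show j + 1 = (flags.take j).length + 1 from by rw [hPlen]]
      exact drop_len_succ _ _ _
    have hdropsucc : flags.drop (j + 1) = List.replicate (tree.length - (j + 1)) false := by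
      conv_lhs => rw [hflags]
      exact hdropP false
    have hdroptree : tree.drop j = tree[j] :: tree.drop (j + 1) :=
      (List.getElem_cons_drop hlt).symm
    have hcast : (j : Int) + 1 = ((j + 1 : Nat) : Int) := by push_cast; ring
    have htoNat : ((j : Int)).toNat = j := by simp
    simp only [aLoop, pvRow0_nat tree j hlt]
    by_cases h0 : ((tree[j]).head?).getD 0 = 0
    · rw [if_pos h0, hcast, aLoop_eq tree (j + 1) flags hlen hdropsucc]
      have : flags.take (j + 1) = flags.take j ++ [false] := by
        conv_lhs => rw [hflags]
        exact htakeP false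
      rw [this, hdroptree]
      simp [specF, h0]
    · rw [if_neg h0, hcast, htoNat, aInner_eq tree _ (j + 1)]
      set v := rowScan (((tree[j]).head?).getD 0) (tree.drop (j + 1)) with hv
      have hset : flags.set j v = flags.take j ++
          v :: List.replicate (tree.length - (j + 1)) false := by
        rw [List.set_eq_take_cons_drop v hjf, hdropsucc]
      rw [hset]
      rw [aLoop_eq tree (j + 1) _
        (by rw [← hset]; simp [hlen]) (by exact hdropP v)]
      rw [htakeP v, hdroptree]
      simp [specF, h0, hv]
termination_by tree.length - j

theorem a_eq_specF (tree : List (List Int)) :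
    compute_last_child_flags tree = specF tree := by
  have h := aLoop_eq tree 0 (List.replicate tree.length false) (by simp) (by simp)
  simpa [compute_last_child_flags] using h

-- ===== VERDICT (by name: the statement is the Claim_ definition above) =====
theorem compute_last_child_flags_spec : Claim_equal_compute_last_child_flags := by
  intro tree _ _
  show compute_last_child_flags tree = compute_last_child_flags_alt tree
  rw [a_eq_specF, alt_eq_specF]
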